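-- pv_equiv track=rewrite | github.com/soohi0/Algorithm_study | 3월_5주/PRO_징검다리건너기/PRO_징검다리건너기_강태훈.py | solution
-- ===== SOURCE A (Python) =====
-- def solution(stones, k):
--     s, e = 1, 200000000
--     while s <= e:
--         m = (s + e) // 2
--         if any([len(j)>=k for j in "".join(["1" if i<=m else " " for i in stones]).split()]):
--             e = m-1
--         else:
--             s = m+1
--     return s
-- ===== SOURCE B (Python) =====
-- def solution(stones, k):
--     # answer = clamp of (min over all k-windows of the window maximum) into [1, 200000001]
--     kk = k if k > 1 else 1
--     best = 200000001  # LIMIT + 1: "no window crossable within the search range"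
--     for i in range(len(stones) - kk + 1):
--         w = stones[i]
--         for j in range(i + 1, i + kk):
--             if stones[j] > w:
--                 w = stones[j]
--         if w < best:
--             best = w
--     return best if best > 1 else 1
-- ===== Notes on version B (the rewrite author's own statement) =====
-- stated objective: alternative
-- what changed: Replaces A's binary search over the threshold (each probe rebuilding a '1'/' ' string, splitting it and scanning token lengths) by a direct computation: the answer is the minimum over all k-windows of the window maximum, clamped into [1, 200000001]; no search, no strings.
import Mathlib
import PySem

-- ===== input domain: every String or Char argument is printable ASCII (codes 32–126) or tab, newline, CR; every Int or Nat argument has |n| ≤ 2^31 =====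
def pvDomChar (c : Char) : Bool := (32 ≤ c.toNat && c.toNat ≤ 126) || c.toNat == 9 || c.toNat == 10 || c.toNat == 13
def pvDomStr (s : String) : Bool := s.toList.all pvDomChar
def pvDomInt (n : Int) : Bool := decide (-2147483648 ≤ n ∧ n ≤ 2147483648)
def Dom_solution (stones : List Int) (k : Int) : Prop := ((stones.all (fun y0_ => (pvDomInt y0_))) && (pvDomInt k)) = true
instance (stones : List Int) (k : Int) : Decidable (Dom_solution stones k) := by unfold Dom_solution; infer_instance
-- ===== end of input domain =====

-- B replaces A's binary search over thresholds (each probe building a "1"/" " string and splitting it)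
-- by directly computing the minimum over all k-windows of the window maximum, clamped to [1, 200000001].


-- ===== PORT A =====
-- any([len(j)>=k for j in "".join(["1" if i<=m else " " for i in stones]).split()])
def condA (stones : List Int) (k m : Int) : Bool :=
  ((PySem.Str.split₀ (PySem.Str.join "" (stones.map (fun i => if i ≤ m then "1" else " ")))).map
     (fun j => decide (k ≤ (PySem.Str.len j : Int)))).any id

-- the 'while s <= e' loop of A
def loopA (stones : List Int) (k : Int) (s e : Int) : Int :=
  if h : s ≤ e then
    let m := PySem.Int.floordiv (s + e) 2
    if condA stones k m then loopA stones k s (m - 1) else loopA stones k (m + 1) e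
  else s
termination_by (e + 1 - s).toNat
decreasing_by
  · have := PySem.Int.floordiv_two_mid_bounds h; omega
  · have := PySem.Int.floordiv_two_mid_bounds h; omega

def solution (stones : List Int) (k : Int) : Int := loopA stones k 1 200000000

-- ===== PORT B =====
def solution_alt (stones : List Int) (k : Int) : Int :=
  let kk : Int := if 1 < k then k else 1
  let best : Int :=
    (PySem.List.pyRange 0 ((stones.length : Int) - kk + 1) 1).foldl
      (fun best i =>
        let w :=
          (PySem.List.pyRange (i + 1) (i + kk) 1).foldl
            (fun w j => if w < PySem.List.pyGetD stones j 0 then PySem.List.pyGetD stones j 0 else w)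
            (PySem.List.pyGetD stones i 0)
        if w < best then w else best)
      200000001
  if 1 < best then best else 1

-- ===== PRECONDITION & SPEC =====
def Spec_solution (stones : List Int) (k : Int) (out : Int) : Prop := out = solution_alt stones k
instance (stones : List Int) (k : Int) (out : Int) : Decidable (Spec_solution stones k out) := by unfold Spec_solution; infer_instance

-- ===== CLAIM (what is proved, stated in full; the proofs are below) =====
def Claim_equal_solution : Prop := ∀ (stones : List Int) (k : Int), Dom_solution stones k → Spec_solution stones k (solution stones k)

-- ===== LEMMAS AND PROOFS =====

-- lengths of the maximal runs of `true`, with `c` the length of the run currently open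
def runsGo : List Bool → Nat → List Nat
  | [], c => if c = 0 then [] else [c]
  | true :: rest, c => runsGo rest (c + 1)
  | false :: rest, c => if c = 0 then runsGo rest 0 else c :: runsGo rest 0

def toCh (b : Bool) : Char := if b then '1' else ' '

-- "the window of length K starting at i has all its stones ≤ m"
def WinAll (stones : List Int) (K : Nat) (m : Int) (i : Nat) : Prop :=
  i + K ≤ stones.length ∧ ∀ j, j < K → stones.getD (i + j) 0 ≤ m

lemma go_lengths (bs : List Bool) (cur : List Char) (acc : List (List Char)) :
    (PySem.Chars.split₀.go (bs.map toCh) cur acc).map List.length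
      = (acc.map List.length).reverse ++ runsGo bs cur.length := by
  induction bs generalizing cur acc with
  | nil =>
    simp only [List.map_nil, PySem.Chars.split₀.go, runsGo]
    by_cases hc : cur = []
    · subst hc; simp
    · rw [if_neg (by simpa using hc), if_neg (by simpa using hc)]
      simp
  | cons b rest ih =>
    cases b with
    | true =>
      simp only [List.map_cons, toCh, PySem.Chars.split₀.go, runsGo]
      rw [if_neg (by decide)]
      rw [ih]
      simp
    | false =>
      simp only [List.map_cons, toCh, Bool.false_eq_true, PySem.Chars.split₀.go, runsGo]
      rw [if_pos (by decide)]
      by_cases hc : cur = []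
      · subst hc
        rw [if_pos (by decide), ih]
        simp
      · rw [if_neg (by simpa using hc), ih]
        rw [if_neg (by simpa using hc)]
        simp

lemma condA_eq (stones : List Int) (k m : Int) :
    condA stones k m
      = (runsGo (stones.map (fun x => decide (x ≤ m))) 0).any (fun L => decide (k ≤ (L : Int))) := by
  unfold condA
  set S := PySem.Str.join "" (stones.map (fun i => if i ≤ m then "1" else " ")) with hS
  have h1 : S.toList = (stones.map (fun x => decide (x ≤ m))).map toCh := by
    rw [hS, PySem.Str.toList_join]
    have h : (stones.map (fun i => if i ≤ m then "1" else " ")).map String.toList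
        = ((stones.map (fun x => decide (x ≤ m))).map toCh).map (fun c => [c]) := by
      simp only [List.map_map]
      apply List.map_congr_left
      intro x _
      by_cases hx : x ≤ m <;> simp [hx, toCh]
    rw [h]
    simpa using PySem.Chars.join_nil_singletons ((stones.map (fun x => decide (x ≤ m))).map toCh)
  have h2 : ((PySem.Str.split₀ S).map (fun j => decide (k ≤ (PySem.Str.len j : Int)))).any id
      = ((PySem.Str.split₀ S).map String.toList).any (fun t => decide (k ≤ (t.length : Int))) := by
    simp only [List.any_map]
    congr 1
  rw [h2, PySem.Str.split₀_map_toList, h1]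
  show (PySem.Chars.split₀.go _ [] []).any _ = _
  have h3 : ∀ (l : List (List Char)) (q : Nat → Bool),
      l.any (fun t => q t.length) = (l.map List.length).any q := by
    intro l q; rw [List.any_map]; rfl
  rw [h3 _ (fun L => decide (k ≤ (L : Int))), go_lengths]
  simp

lemma runsGo_pos (bs : List Bool) (c : Nat) : ∀ L ∈ runsGo bs c, 1 ≤ L := by
  induction bs generalizing c with
  | nil =>
    intro L hL
    simp only [runsGo] at hL
    split_ifs at hL with hc
    · simp at hL
    · simp at hL; omega
  | cons b rest ih =>
    intro L hL
    cases b with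
    | true => exact ih (c + 1) L hL
    | false =>
      simp only [runsGo] at hL
      split_ifs at hL with hc
      · exact ih 0 L hL
      · rcases List.mem_cons.mp hL with rfl | h
        · omega
        · exact ih 0 L h

lemma getD_ra (c : Nat) (bs : List Bool) (idx : Nat) :
    (List.replicate c true ++ bs).getD idx false
      = if idx < c then true else bs.getD (idx - c) false := by
  by_cases h : idx < c
  · rw [if_pos h, List.getD_eq_getElem?_getD, List.getElem?_append_left (by simpa using h)]
    simp [h]
  · rw [if_neg h, List.getD_eq_getElem?_getD,
      List.getElem?_append_right (by simpa using not_lt.mp h)]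
    simp [List.getD_eq_getElem?_getD]

lemma runsGo_window (bs : List Bool) (c K : Nat) (hK : 1 ≤ K) :
    (∃ L ∈ runsGo bs c, K ≤ L) ↔
      ∃ i, i + K ≤ (List.replicate c true ++ bs).length ∧
        ∀ j, j < K → (List.replicate c true ++ bs).getD (i + j) false = true := by
  induction bs generalizing c with
  | nil =>
    simp only [runsGo]
    constructor
    · rintro ⟨L, hL, hKL⟩
      split_ifs at hL with hc
      · simp at hL
      · simp at hL; subst hL
        refine ⟨0, by simp; omega, fun j hj => ?_⟩
        rw [getD_ra, if_pos (by omega)]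
    · rintro ⟨i, hi, hall⟩
      simp only [List.append_nil, List.length_replicate] at hi
      have hc : ¬ c = 0 := by omega
      rw [if_neg hc]
      exact ⟨c, by simp, by omega⟩
  | cons b rest ih =>
    cases b with
    | true =>
      have hl : List.replicate (c + 1) true ++ rest = List.replicate c true ++ true :: rest := by
        rw [List.replicate_succ']; simp
      rw [runsGo, ih (c + 1), hl]
    | false =>
      rw [runsGo]
      by_cases hc : c = 0
      · subst hc
        rw [if_pos rfl, ih 0]
        simp only [List.replicate_zero, List.nil_append, List.length_cons]
        constructor
        · rintro ⟨i, hi, hall⟩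
          refine ⟨i + 1, by omega, fun j hj => ?_⟩
          have hidx : i + 1 + j = (i + j) + 1 := by omega
          rw [hidx, List.getD_cons_succ]
          exact hall j hj
        · rintro ⟨i, hi, hall⟩
          cases i with
          | zero =>
            have h0 := hall 0 (by omega)
            simp at h0
          | succ i' =>
            refine ⟨i', by omega, fun j hj => ?_⟩
            have h := hall j hj
            have hidx : i' + 1 + j = (i' + j) + 1 := by omega
            rw [hidx, List.getD_cons_succ] at h
            exact h
      · rw [if_neg hc]
        have hsplit : (∃ L ∈ c :: runsGo rest 0, K ≤ L) ↔ K ≤ c ∨ ∃ L ∈ runsGo rest 0, K ≤ L := by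
          simp
        rw [hsplit, ih 0]
        simp only [List.replicate_zero, List.nil_append, List.length_append,
          List.length_replicate, List.length_cons]
        constructor
        · rintro (hKc | ⟨i, hi, hall⟩)
          · refine ⟨0, by omega, fun j hj => ?_⟩
            rw [getD_ra, if_pos (by omega)]
          · refine ⟨c + 1 + i, by omega, fun j hj => ?_⟩
            rw [getD_ra, if_neg (by omega)]
            have hidx : c + 1 + i + j - c = (i + j) + 1 := by omega
            rw [hidx, List.getD_cons_succ]
            exact hall j hj
        · rintro ⟨i, hi, hall⟩
          by_cases hic : i + K ≤ c
          · exact Or.inl (by omega)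
          · have hgt : c < i ∨ (i ≤ c ∧ c < i + K) := by omega
            rcases hgt with hgt | ⟨h1, h2⟩
            · refine Or.inr ⟨i - (c + 1), by omega, fun j hj => ?_⟩
              have h := hall j hj
              rw [getD_ra, if_neg (by omega)] at h
              have hidx : i + j - c = (i - (c + 1) + j) + 1 := by omega
              rw [hidx, List.getD_cons_succ] at h
              exact h
            · exfalso
              have h := hall (c - i) (by omega)
              rw [getD_ra, if_neg (by omega)] at h
              have hidx : i + (c - i) - c = 0 := by omega
              rw [hidx, List.getD_cons_zero] at h
              exact Bool.false_ne_true h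

lemma getD_map_decide (stones : List Int) (m : Int) (n : Nat) (h : n < stones.length) :
    (stones.map (fun x => decide (x ≤ m))).getD n false = decide (stones.getD n 0 ≤ m) := by
  rw [List.getD_eq_getElem?_getD, List.getElem?_map,
    List.getElem?_eq_getElem (by simpa using h),
    List.getD_eq_getElem?_getD, List.getElem?_eq_getElem h]
  rfl

lemma condA_iff (stones : List Int) (k m : Int) :
    condA stones k m = true ↔ ∃ i, WinAll stones (max k 1).toNat m i := by
  rw [condA_eq, List.any_eq_true]
  set bs := stones.map (fun x => decide (x ≤ m)) with hbs
  set K := (max k 1).toNat with hK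
  have hK1 : 1 ≤ K := by omega
  have step1 : (∃ L ∈ runsGo bs 0, decide (k ≤ (L : Int)) = true) ↔ ∃ L ∈ runsGo bs 0, K ≤ L := by
    constructor
    · rintro ⟨L, hL, hd⟩
      have hp := runsGo_pos bs 0 L hL
      simp only [decide_eq_true_eq] at hd
      exact ⟨L, hL, by omega⟩
    · rintro ⟨L, hL, hd⟩
      exact ⟨L, hL, by simp only [decide_eq_true_eq]; omega⟩
  rw [step1, runsGo_window bs 0 K hK1]
  simp only [List.replicate_zero, List.nil_append, hbs, List.length_map]
  constructor
  · rintro ⟨i, hi, hall⟩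
    refine ⟨i, hi, fun j hj => ?_⟩
    have h := hall j hj
    rw [getD_map_decide stones m (i + j) (by omega)] at h
    simpa using h
  · rintro ⟨i, hi, hall⟩
    refine ⟨i, hi, fun j hj => ?_⟩
    rw [getD_map_decide stones m (i + j) (by omega)]
    simpa using hall j hj

lemma condA_mono (stones : List Int) (k m m' : Int) (h : m ≤ m')
    (hc : condA stones k m = true) : condA stones k m' = true := by
  rw [condA_iff] at hc ⊢
  obtain ⟨i, h1, h2⟩ := hc
  exact ⟨i, h1, fun j hj => le_trans (h2 j hj) h⟩

lemma loop_spec_aux (stones : List Int) (k : Int) :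
    ∀ (n : Nat) (s e : Int), (e + 1 - s).toNat = n → s ≤ e + 1 →
      s ≤ loopA stones k s e ∧ loopA stones k s e ≤ e + 1 ∧
        (∀ m, s ≤ m → m < loopA stones k s e → condA stones k m = false) ∧
        (∀ m, loopA stones k s e ≤ m → m ≤ e → condA stones k m = true) := by
  intro n
  induction n using Nat.strong_induction_on with
  | _ n ih =>
    intro s e hn hse
    rw [loopA]
    by_cases h : s ≤ e
    · simp only [dif_pos h]
      have hb := PySem.Int.floordiv_two_mid_bounds h
      set m := PySem.Int.floordiv (s + e) 2 with hm
      by_cases hc : condA stones k m = true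
      · rw [if_pos hc]
        obtain ⟨r1, r2, r3, r4⟩ := ih ((m - 1) + 1 - s).toNat (by omega) s (m - 1) rfl (by omega)
        refine ⟨r1, by omega, r3, fun m' hr hle => ?_⟩
        by_cases hm' : m' ≤ m - 1
        · exact r4 m' hr hm'
        · exact condA_mono stones k m m' (by omega) hc
      · rw [if_neg hc]
        obtain ⟨r1, r2, r3, r4⟩ := ih (e + 1 - (m + 1)).toNat (by omega) (m + 1) e rfl (by omega)
        refine ⟨by omega, r2, fun m' hs' hlt => ?_, r4⟩
        by_cases hm' : m + 1 ≤ m'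
        · exact r3 m' hm' hlt
        · cases hcm : condA stones k m' with
          | false => rfl
          | true => exact absurd (condA_mono stones k m' m (by omega) hcm) hc
    · simp only [dif_neg h]
      exact ⟨le_rfl, by omega, fun m' h1 h2 => by omega, fun m' h1 h2 => by omega⟩

lemma foldl_min_spec (g : Int → Int) (l : List Int) (b0 : Int) :
    (l.foldl (fun b i => if g i < b then g i else b) b0) ≤ b0 ∧
      (∀ i ∈ l, (l.foldl (fun b i => if g i < b then g i else b) b0) ≤ g i) ∧
      ((l.foldl (fun b i => if g i < b then g i else b) b0) = b0 ∨
        ∃ i ∈ l, (l.foldl (fun b i => if g i < b then g i else b) b0) = g i) := by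
  induction l generalizing b0 with
  | nil => simp
  | cons x xs ih =>
    simp only [List.foldl_cons]
    by_cases hx : g x < b0
    · rw [if_pos hx]
      obtain ⟨h1, h2, h3⟩ := ih (g x)
      refine ⟨by omega, ?_, ?_⟩
      · intro i hi
        rcases List.mem_cons.mp hi with rfl | hi
        · exact h1
        · exact h2 i hi
      · rcases h3 with h3 | ⟨i, hi, h3⟩
        · exact Or.inr ⟨x, List.mem_cons_self, h3⟩
        · exact Or.inr ⟨i, List.mem_cons_of_mem _ hi, h3⟩
    · rw [if_neg hx]
      obtain ⟨h1, h2, h3⟩ := ih b0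
      refine ⟨h1, ?_, ?_⟩
      · intro i hi
        rcases List.mem_cons.mp hi with rfl | hi
        · omega
        · exact h2 i hi
      · rcases h3 with h3 | ⟨i, hi, h3⟩
        · exact Or.inl h3
        · exact Or.inr ⟨i, List.mem_cons_of_mem _ hi, h3⟩

lemma foldl_max_spec (f : Int → Int) (l : List Int) (w0 : Int) :
    w0 ≤ (l.foldl (fun w j => if w < f j then f j else w) w0) ∧
      (∀ j ∈ l, f j ≤ (l.foldl (fun w j => if w < f j then f j else w) w0)) ∧
      ((l.foldl (fun w j => if w < f j then f j else w) w0) = w0 ∨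
        ∃ j ∈ l, (l.foldl (fun w j => if w < f j then f j else w) w0) = f j) := by
  induction l generalizing w0 with
  | nil => simp
  | cons x xs ih =>
    simp only [List.foldl_cons]
    by_cases hx : w0 < f x
    · rw [if_pos hx]
      obtain ⟨h1, h2, h3⟩ := ih (f x)
      refine ⟨by omega, ?_, ?_⟩
      · intro j hj
        rcases List.mem_cons.mp hj with rfl | hj
        · exact h1
        · exact h2 j hj
      · rcases h3 with h3 | ⟨j, hj, h3⟩
        · exact Or.inr ⟨x, List.mem_cons_self, h3⟩
        · exact Or.inr ⟨j, List.mem_cons_of_mem _ hj, h3⟩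
    · rw [if_neg hx]
      obtain ⟨h1, h2, h3⟩ := ih w0
      refine ⟨le_rfl.trans h1, ?_, ?_⟩
      · intro j hj
        rcases List.mem_cons.mp hj with rfl | hj
        · omega
        · exact h2 j hj
      · rcases h3 with h3 | ⟨j, hj, h3⟩
        · exact Or.inl h3
        · exact Or.inr ⟨j, List.mem_cons_of_mem _ hj, h3⟩

-- proof-side names for the two folds of solution_alt
def winMax (stones : List Int) (kk i : Int) : Int :=
  (PySem.List.pyRange (i + 1) (i + kk) 1).foldl
    (fun w j => if w < PySem.List.pyGetD stones j 0 then PySem.List.pyGetD stones j 0 else w)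
    (PySem.List.pyGetD stones i 0)

def bestOf (stones : List Int) (kk : Int) : Int :=
  (PySem.List.pyRange 0 ((stones.length : Int) - kk + 1) 1).foldl
    (fun b i => if winMax stones kk i < b then winMax stones kk i else b) 200000001

lemma alt_eq (stones : List Int) (k : Int) :
    solution_alt stones k =
      if 1 < bestOf stones (if 1 < k then k else 1) then bestOf stones (if 1 < k then k else 1)
      else 1 := rfl

lemma winMax_spec (stones : List Int) (kk i : Int) :
    PySem.List.pyGetD stones i 0 ≤ winMax stones kk i ∧
      (∀ j ∈ PySem.List.pyRange (i + 1) (i + kk) 1,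
        PySem.List.pyGetD stones j 0 ≤ winMax stones kk i) ∧
      (winMax stones kk i = PySem.List.pyGetD stones i 0 ∨
        ∃ j ∈ PySem.List.pyRange (i + 1) (i + kk) 1,
          winMax stones kk i = PySem.List.pyGetD stones j 0) :=
  foldl_max_spec (fun j => PySem.List.pyGetD stones j 0) _ _

lemma bestOf_spec (stones : List Int) (kk : Int) :
    bestOf stones kk ≤ 200000001 ∧
      (∀ i ∈ PySem.List.pyRange 0 ((stones.length : Int) - kk + 1) 1,
        bestOf stones kk ≤ winMax stones kk i) ∧
      (bestOf stones kk = 200000001 ∨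
        ∃ i ∈ PySem.List.pyRange 0 ((stones.length : Int) - kk + 1) 1,
          bestOf stones kk = winMax stones kk i) :=
  foldl_min_spec (winMax stones kk) _ _

lemma alt_props (stones : List Int) (k : Int) :
    1 ≤ solution_alt stones k ∧ solution_alt stones k ≤ 200000001 ∧
      (∀ m, 1 ≤ m → m < solution_alt stones k → condA stones k m = false) ∧
      (∀ m, solution_alt stones k ≤ m → m ≤ 200000000 → condA stones k m = true) := by
  have hkk1 : (1 : Int) ≤ (if 1 < k then k else 1) := by split_ifs <;> omega
  set kk : Int := if 1 < k then k else 1 with hkk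
  set K : Nat := (max k 1).toNat with hK
  have hkkK : kk = (K : Int) := by rw [hkk, hK]; split_ifs <;> omega
  have hK1 : 1 ≤ K := by omega
  rw [alt_eq, ← hkk]
  set best : Int := bestOf stones kk with hbest
  obtain ⟨hb0, hbmin, hbatt⟩ := bestOf_spec stones kk
  rw [← hbest] at hb0 hbmin hbatt
  have hconv : ∀ j : Int, 0 ≤ j → j < (stones.length : Int) →
      PySem.List.pyGetD stones j 0 = stones.getD j.toNat 0 := by
    intro j hj1 hj2
    rw [PySem.List.pyGetD_eq_getElem stones 0 hj1 (by simpa using hj2),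
      List.getD_eq_getElem?_getD, List.getElem?_eq_getElem (by omega)]
    rfl
  have hwin : ∀ i : Int, 0 ≤ i → i + kk ≤ (stones.length : Int) →
      (∀ j : Nat, j < K → stones.getD (i.toNat + j) 0 ≤ winMax stones kk i) ∧
        (∃ jn : Nat, jn < K ∧ winMax stones kk i = stones.getD (i.toNat + jn) 0) := by
    intro i h0 hle
    obtain ⟨hw0, hwall, hwatt⟩ := winMax_spec stones kk i
    constructor
    · intro j hj
      rcases Nat.eq_zero_or_pos j with rfl | hjpos
      · simp only [Nat.add_zero]
        rw [← hconv i h0 (by omega)]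
        exact hw0
      · have hmem : i + (j : Int) ∈ PySem.List.pyRange (i + 1) (i + kk) 1 := by
          rw [PySem.List.mem_pyRange_one]; omega
        have h := hwall (i + (j : Int)) hmem
        rw [hconv (i + (j : Int)) (by omega) (by omega)] at h
        have hidx : (i + (j : Int)).toNat = i.toNat + j := by omega
        rwa [hidx] at h
    · rcases hwatt with h | ⟨j, hjmem, h⟩
      · refine ⟨0, by omega, ?_⟩
        rw [h, hconv i h0 (by omega)]
        simp
      · rw [PySem.List.mem_pyRange_one] at hjmem
        refine ⟨(j - i).toNat, by omega, ?_⟩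
        rw [h, hconv j (by omega) (by omega)]
        congr 1
        omega
  refine ⟨by split_ifs <;> omega, by split_ifs <;> omega, ?_, ?_⟩
  · intro m hm1 hmlt
    have hmbest : m < best := by split_ifs at hmlt <;> omega
    rw [Bool.eq_false_iff]
    intro hc
    rw [condA_iff, ← hK] at hc
    obtain ⟨i, hi1, hi2⟩ := hc
    have hmem : (i : Int) ∈ PySem.List.pyRange 0 ((stones.length : Int) - kk + 1) 1 := by
      rw [PySem.List.mem_pyRange_one]
      refine ⟨by omega, by rw [hkkK]; omega⟩
    have h1 := hbmin (i : Int) hmem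
    obtain ⟨_, jn, hjn, hgeq⟩ := hwin (i : Int) (by omega) (by rw [hkkK]; omega)
    have h2 : winMax stones kk (i : Int) ≤ m := by
      rw [hgeq, show ((i : Int)).toNat = i by omega]
      exact hi2 jn hjn
    omega
  · intro m hm1 hm2
    have hbm : best ≤ m := by split_ifs at hm1 <;> omega
    rcases hbatt with h | ⟨i, hmem, h⟩
    · omega
    · rw [PySem.List.mem_pyRange_one] at hmem
      rw [condA_iff, ← hK]
      obtain ⟨hall, _⟩ := hwin i (by omega) (by omega)
      refine ⟨i.toNat, ?_, ?_⟩
      · have : (i.toNat : Int) + (K : Int) ≤ (stones.length : Int) := by rw [← hkkK]; omega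
        omega
      · intro j hj
        have := hall j hj
        omega

-- ===== VERDICT (by name: the statement is the Claim_ definition above) =====
theorem solution_spec : Claim_equal_solution := by
  intro stones k _
  unfold Spec_solution solution
  obtain ⟨ha1, ha2, ha3, ha4⟩ := loop_spec_aux stones k (((200000000 : Int) + 1 - 1).toNat) 1 200000000 rfl (by norm_num)
  obtain ⟨hb1, hb2, hb3, hb4⟩ := alt_props stones k
  rcases lt_trichotomy (loopA stones k 1 200000000) (solution_alt stones k) with h | h | h
  · have ht := ha4 (loopA stones k 1 200000000) le_rfl (by omega)
    have hf := hb3 (loopA stones k 1 200000000) (by omega) h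
    rw [ht] at hf; exact absurd hf (by simp)
  · exact h
  · have ht := hb4 (solution_alt stones k) le_rfl (by omega)
    have hf := ha3 (solution_alt stones k) (by omega) h
    rw [ht] at hf; exact absurd hf (by simp)
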